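-- pv_equiv track=rewrite | github.com/moonyeol/algorithm | python/naverFinacial1.py | solution
-- ===== SOURCE A (Python) =====
-- def solution(id_list, k):
--     answer = 0
--     couponDict = {}
--     for ids in id_list:
--         dailySet = set()
--         for id in ids:
--             if id == ' ':
--                 pass
--             else:
--                 dailySet.add(id)
--         for id in dailySet:
--             if id in couponDict:
--                 couponDict[id] += 1
--             else:
--                 couponDict[id] = 1
--     for i in list(couponDict.values()):
--         answer += i
--     return answer
-- ===== SOURCE B (Python) =====
-- def solution(id_list, k):
--     # Transposed count: for each distinct non-space character of the whole input,
--     # count the number of days whose string contains it, and sum these counts.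
--     # Correct because both sides count the pairs (day, c) with c a non-space
--     # character occurring in that day's string.
--     chars = {c for c in ''.join(id_list) if c != ' '}
--     total = 0
--     for c in chars:
--         for ids in id_list:
--             if c in ids:
--                 total += 1
--     return total
-- ===== Notes on version B (the rewrite author's own statement) =====
-- stated objective: alternative
-- what changed: B transposes the count: instead of building a per-day distinct set and maintaining a per-character frequency dictionary summed in a final pass, it iterates over the distinct non-space characters of the whole input and counts for each one the number of days whose string contains it, summing those counts (double-counting of (day, character) pairs).
import Mathlib
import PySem

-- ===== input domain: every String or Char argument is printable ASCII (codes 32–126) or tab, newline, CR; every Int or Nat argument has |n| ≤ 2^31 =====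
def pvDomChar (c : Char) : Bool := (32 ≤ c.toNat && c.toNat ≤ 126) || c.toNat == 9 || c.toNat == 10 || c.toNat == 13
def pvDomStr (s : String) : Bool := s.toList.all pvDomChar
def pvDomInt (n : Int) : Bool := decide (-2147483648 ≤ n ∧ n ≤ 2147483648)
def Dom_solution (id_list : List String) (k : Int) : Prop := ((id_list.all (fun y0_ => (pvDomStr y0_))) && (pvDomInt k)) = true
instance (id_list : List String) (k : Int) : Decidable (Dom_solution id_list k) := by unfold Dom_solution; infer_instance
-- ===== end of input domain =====

-- B transposes A's count: instead of a per-day distinct set feeding a per-character frequency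
-- dictionary summed at the end, it counts for each distinct non-space character the number of
-- days containing it (objective: alternative traversal, same (day, char) pairs counted).

-- ===== PORT A =====
def solution (id_list : List String) (k : Int) : Int :=
  let answer : Int := 0
  let couponDict : PySem.Dict Char Int := PySem.Dict.empty
  let couponDict := id_list.foldl (fun cd ids =>
    let dailySet : PySem.Set Char :=
      ids.toList.foldl (fun s c => if c = ' ' then s else PySem.Set.add s c) PySem.Set.empty
    dailySet.foldl (fun d c =>
      if d.contains c then d.insert c (d.getD c 0 + 1) else d.insert c 1) cd) couponDict
  couponDict.values.foldl (fun a i => a + i) answer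

-- ===== PORT B =====
-- 'c in ids' for a one-character c is character membership in the string (exact).
def solution_alt (id_list : List String) (k : Int) : Int :=
  let chars : PySem.Set Char :=
    PySem.Set.ofList (((id_list.map String.toList).flatten).filter (fun c => c ≠ ' '))
  chars.foldl (fun total c =>
    id_list.foldl (fun t ids => if ids.toList.contains c then t + 1 else t) total) 0

-- ===== PRECONDITION & SPEC =====
def Spec_solution (id_list : List String) (k : Int) (out : Int) : Prop := out = solution_alt id_list k
instance (id_list : List String) (k : Int) (out : Int) : Decidable (Spec_solution id_list k out) := by unfold Spec_solution; infer_instance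

-- ===== CLAIM (what is proved, stated in full; the proofs are below) =====
def Claim_equal_solution : Prop := ∀ (id_list : List String) (k : Int), Dom_solution id_list k → Spec_solution id_list k (solution id_list k)

-- ===== LEMMAS AND PROOFS =====

-- ---- A-side: the dictionary's value sum grows by the size of each day's set ----

def pvSumV (d : PySem.Dict Char Int) : Int := d.values.sum

def pvStep (d : PySem.Dict Char Int) (c : Char) : PySem.Dict Char Int :=
  if d.contains c then d.insert c (d.getD c 0 + 1) else d.insert c 1

lemma pv_map_id (l : List (Char × Int)) (c : Char) (w : Int)
    (h : c ∉ l.map Prod.fst) :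
    l.map (fun p => if p.1 == c then (c, w) else p) = l := by
  induction l with
  | nil => rfl
  | cons p t ih =>
    simp only [List.map_cons, List.mem_cons, not_or] at h
    simp only [List.map_cons]
    rw [if_neg (by simp only [beq_iff_eq]; exact fun hh => h.1 hh.symm), ih h.2]

lemma pv_sum_snd_bump (l : List (Char × Int)) (c : Char) (w : Int)
    (hnd : (l.map Prod.fst).Nodup) (hc : c ∈ l.map Prod.fst)
    (hw : ∀ p ∈ l, p.1 = c → w = p.2 + 1) :
    ((l.map (fun p => if p.1 == c then (c, w) else p)).map Prod.snd).sum
      = (l.map Prod.snd).sum + 1 := by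
  induction l with
  | nil => simp at hc
  | cons p t ih =>
    simp only [List.map_cons, List.nodup_cons] at hnd
    simp only [List.map_cons, List.mem_cons] at hc
    by_cases hpc : p.1 = c
    · have hwp : w = p.2 + 1 := hw p List.mem_cons_self hpc
      have hnt : c ∉ t.map Prod.fst := hpc ▸ hnd.1
      rw [List.map_cons, pv_map_id t c w hnt, List.map_cons, List.sum_cons,
        List.map_cons, List.sum_cons, if_pos (by simpa using hpc)]
      simp only []
      omega
    · have hct : c ∈ t.map Prod.fst := by
        rcases hc with h' | h'
        · exact absurd h'.symm hpc
        · exact h'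
      rw [List.map_cons, List.map_cons, List.sum_cons, List.map_cons, List.sum_cons,
        if_neg (by simp only [beq_iff_eq]; exact hpc),
        ih hnd.2 hct (fun q hq => hw q (List.mem_cons_of_mem _ hq))]
      ring

lemma pv_sumV_step (d : PySem.Dict Char Int) (c : Char) (hnd : d.keys.Nodup) :
    pvSumV (pvStep d c) = pvSumV d + 1 := by
  unfold pvStep
  by_cases hmem : d.contains c = true
  · rw [if_pos hmem]
    have hck : c ∈ d.keys := (PySem.Dict.contains_iff_mem_keys d c).mp hmem
    have hitems := PySem.Dict.items_insert_of_contains d (d.getD c 0 + 1) hmem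
    simp only [pvSumV, PySem.Dict.values, hitems]
    exact pv_sum_snd_bump d.items c (d.getD c 0 + 1)
      (by simpa [PySem.Dict.keys] using hnd)
      (by simpa [PySem.Dict.keys] using hck)
      (fun p hp hpc => by
        have hmemi : (c, p.2) ∈ d.items := by
          have := hp; rwa [show p = (p.1, p.2) from rfl, hpc] at this
        have := PySem.Dict.getD_of_mem_items d hmemi hnd 0
        omega)
  · rw [if_neg hmem]
    have hitems := PySem.Dict.items_insert_of_not_contains d 1 ((Bool.not_eq_true _).mp hmem)
    simp [pvSumV, PySem.Dict.values, hitems]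

lemma pv_nodup_step (d : PySem.Dict Char Int) (c : Char) (hnd : d.keys.Nodup) :
    (pvStep d c).keys.Nodup := by
  unfold pvStep
  by_cases hmem : d.contains c = true
  · rw [if_pos hmem, PySem.Dict.keys_insert_of_contains d _ hmem]; exact hnd
  · rw [if_neg hmem,
      PySem.Dict.keys_insert_of_not_contains d _ (Bool.not_eq_true _ ▸ hmem)]
    refine List.nodup_append.mpr ⟨hnd, List.nodup_singleton _, ?_⟩
    intro x hx y hy
    have hyc : y = c := by simpa using hy
    intro hxy
    exact hmem ((PySem.Dict.contains_iff_mem_keys d c).mpr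
      (by rw [← hyc, ← hxy]; exact hx))

lemma pv_inner (s : List Char) (d : PySem.Dict Char Int) (hnd : d.keys.Nodup) :
    pvSumV (s.foldl pvStep d) = pvSumV d + s.length ∧ (s.foldl pvStep d).keys.Nodup := by
  induction s generalizing d with
  | nil => simpa using hnd
  | cons c t ih =>
    obtain ⟨h1, h2⟩ := ih (pvStep d c) (pv_nodup_step d c hnd)
    refine ⟨?_, by simpa using h2⟩
    simp only [List.foldl_cons, h1, pv_sumV_step d c hnd, List.length_cons]
    push_cast; ring

-- A's daily-set loop equals set-of-filtered-list
lemma pv_daily (s : List Char) :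
    s.foldl (fun acc c => if c = ' ' then acc else PySem.Set.add acc c) PySem.Set.empty
      = PySem.Set.ofList (s.filter (fun c => c ≠ ' ')) := by
  rw [PySem.Set.ofList_eq_foldl, ← PySem.List.foldl_ite_eq_foldl_filter (fun c => c ≠ ' ')]
  exact PySem.List.foldl_congr_mem s _ _ _
    (fun acc x _ => by by_cases h : x = ' ' <;> simp [h])

lemma pv_outer (L : List String) (d : PySem.Dict Char Int) (hnd : d.keys.Nodup) :
    pvSumV (L.foldl (fun cd ids =>
        (PySem.Set.ofList (ids.toList.filter (fun c => c ≠ ' '))).foldl pvStep cd) d)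
      = pvSumV d + (L.map (fun ids =>
          ((PySem.Set.ofList (ids.toList.filter (fun c => c ≠ ' '))).length : Int))).sum ∧
      (L.foldl (fun cd ids =>
        (PySem.Set.ofList (ids.toList.filter (fun c => c ≠ ' '))).foldl pvStep cd) d).keys.Nodup := by
  induction L generalizing d with
  | nil => simpa using hnd
  | cons ids t ih =>
    simp only [List.foldl_cons]
    obtain ⟨h1, h2⟩ := pv_inner (PySem.Set.ofList (ids.toList.filter (fun c => c ≠ ' '))) d hnd
    obtain ⟨h3, h4⟩ := ih _ h2
    refine ⟨?_, h4⟩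
    simp only [List.map_cons, List.sum_cons, h3, h1]
    ring

-- ---- B-side: folds to sums, then swap the double count ----

-- B's inner day loop counts the days containing c
lemma pv_inner_count (c : Char) (L : List String) (t : Int) :
    L.foldl (fun t ids => if ids.toList.contains c then t + 1 else t) t
      = t + (L.countP (fun ids => ids.toList.contains c) : Int) := by
  induction L generalizing t with
  | nil => simp
  | cons s r ih =>
    simp only [List.foldl_cons, List.countP_cons, ih]
    by_cases h : c ∈ s.toList <;> simp [h] <;> push_cast <;> omega

-- accumulator form of foldl-with-addition
lemma pv_foldl_add (S : List Char) (g : Char → Int) (t : Int) :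
    S.foldl (fun total c => total + g c) t = t + (S.map g).sum := by
  induction S generalizing t with
  | nil => simp
  | cons c r ih =>
    simp only [List.foldl_cons, List.map_cons, List.sum_cons, ih]
    ring

-- B's outer loop sums those counts over the character set
lemma pv_outer_sum (S : List Char) (L : List String) (t : Int) :
    S.foldl (fun total c =>
        L.foldl (fun t ids => if ids.toList.contains c then t + 1 else t) total) t
      = t + (S.map (fun c => (L.countP (fun ids => ids.toList.contains c) : Int))).sum := by
  rw [show (fun (total : Int) (c : Char) =>
        L.foldl (fun t ids => if ids.toList.contains c then t + 1 else t) total)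
      = (fun total c => total + (L.countP (fun ids => ids.toList.contains c) : Int)) from
      funext fun total => funext fun c => pv_inner_count c L total,
    pv_foldl_add]

-- sum of indicators is a count
lemma pv_sum_ite (S : List Char) (p : Char → Bool) :
    (S.map (fun c => if p c then (1 : Int) else 0)).sum = (S.countP p : Int) := by
  induction S with
  | nil => simp
  | cons c r ih =>
    simp only [List.map_cons, List.sum_cons, List.countP_cons, ih]
    by_cases h : p c = true <;> simp [h] <;> push_cast <;> ring

-- double-counting swap: Σ_{c ∈ S} #{days ∋ c} = Σ_{day} #{c ∈ S : c ∈ day}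
lemma pv_swap (S : List Char) (L : List String) :
    (S.map (fun c => (L.countP (fun ids => ids.toList.contains c) : Int))).sum
      = (L.map (fun ids => (S.countP (fun c => ids.toList.contains c) : Int))).sum := by
  induction L with
  | nil => simp
  | cons s r ih =>
    simp only [List.map_cons, List.sum_cons, List.countP_cons, ← ih, ← pv_sum_ite S
      (fun c => s.toList.contains c)]
    rw [← List.sum_map_add]
    congr 1
    refine List.map_congr_left (fun c _ => ?_)
    by_cases h : s.toList.contains c = true <;> simp [h] <;> push_cast <;> ring

-- per day: the characters of S lying in the day are exactly the day's distinct non-space chars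
lemma pv_perday (L : List String) (s : String) (hs : s ∈ L) :
    ((PySem.Set.ofList (((L.map String.toList).flatten).filter (fun c => c ≠ ' '))).countP
        (fun c => s.toList.contains c) : Int)
      = ((PySem.Set.ofList (s.toList.filter (fun c => c ≠ ' '))).length : Int) := by
  set S := PySem.Set.ofList (((L.map String.toList).flatten).filter (fun c => c ≠ ' ')) with hS
  set D := PySem.Set.ofList (s.toList.filter (fun c => c ≠ ' ')) with hD
  have hSnd : S.Nodup := PySem.Set.nodup_ofList _
  have hDnd : D.Nodup := PySem.Set.nodup_ofList _
  have hperm : List.Perm (S.filter (fun c => s.toList.contains c)) D := by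
    rw [List.perm_ext_iff_of_nodup (hSnd.filter _) hDnd]
    intro c
    simp only [List.mem_filter, hS, hD, PySem.Set.mem_ofList, List.mem_flatten,
      List.mem_map, List.contains_iff_mem, decide_eq_true_eq]
    constructor
    · rintro ⟨⟨_, hne⟩, hcs⟩; exact ⟨hcs, hne⟩
    · rintro ⟨hcs, hne⟩
      exact ⟨⟨⟨s.toList, ⟨s, hs, rfl⟩, hcs⟩, hne⟩, hcs⟩
  rw [List.countP_eq_length_filter, hperm.length_eq]

-- ===== VERDICT (by name: the statement is the Claim_ definition above) =====
theorem solution_spec : Claim_equal_solution := by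
  intro id_list k _
  unfold Spec_solution solution solution_alt
  simp only [pv_daily]
  rw [show (fun (d : PySem.Dict Char Int) (c : Char) =>
      if d.contains c then d.insert c (d.getD c 0 + 1) else d.insert c 1) = pvStep from rfl]
  have h := pv_outer id_list PySem.Dict.empty (by simp [PySem.Dict.keys, PySem.Dict.empty])
  rw [show ∀ d : PySem.Dict Char Int, d.values.foldl (fun a i => a + i) 0 = pvSumV d from
      fun d => by simpa [pvSumV] using (PySem.List.foldl_add d.values id 0),
    h.1, pv_outer_sum, pv_swap]
  simp only [pvSumV, PySem.Dict.empty, PySem.Dict.values, List.map_nil, List.sum_nil, zero_add]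
  exact congrArg List.sum (List.map_congr_left (fun s hs => (pv_perday id_list s hs).symm))
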